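-- pv_equiv track=rewrite | github.com/Frijolito69/IA_P2 | ENFOQUE 1/PLANIFICACION/022_Acondicionamiento_del_Corte.py | resolver_restante
-- ===== SOURCE A (Python) =====
-- variables = ['A', 'B', 'C', 'D', 'E']
--
-- dominios = {
--     'A': ['rojo', 'verde', 'azul'],
--     'B': ['rojo', 'verde', 'azul'],
--     'C': ['rojo', 'verde', 'azul'],
--     'D': ['rojo', 'verde', 'azul'],
--     'E': ['rojo', 'verde', 'azul'],
-- }
--
-- vecinos = {
--     'A': ['B', 'E'],
--     'B': ['A', 'C'],
--     'C': ['B', 'D'],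
--     'D': ['C', 'E'],
--     'E': ['D', 'A']
-- }
--
-- def es_valido(asignacion, var, valor):
--     for vecino in vecinos[var]:
--         if vecino in asignacion and asignacion[vecino] == valor:
--             return False
--     return True
--
-- def resolver_restante(asignacion):
--     if len(asignacion) == len(variables):
--         return asignacion
--
--     var = [v for v in variables if v not in asignacion][0]
--
--     for valor in dominios[var]:
--         if es_valido(asignacion, var, valor):
--             asignacion[var] = valor
--             resultado = resolver_restante(asignacion)
--             if resultado:
--                 return resultado
--             del asignacion[var]
--
--     return None
-- ===== SOURCE B (Python) =====
-- variables = ['A', 'B', 'C', 'D', 'E']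
--
-- dominios = {
--     'A': ['rojo', 'verde', 'azul'],
--     'B': ['rojo', 'verde', 'azul'],
--     'C': ['rojo', 'verde', 'azul'],
--     'D': ['rojo', 'verde', 'azul'],
--     'E': ['rojo', 'verde', 'azul'],
-- }
--
-- vecinos = {
--     'A': ['B', 'E'],
--     'B': ['A', 'C'],
--     'C': ['B', 'D'],
--     'D': ['C', 'E'],
--     'E': ['D', 'A']
-- }
--
-- def resolver_restante(asignacion):
--     # Greedy one-pass fill: every variable has at most 2 neighbours but 3
--     # colours, so the first admissible colour always exists and no
--     # backtracking is ever needed.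
--     while len(asignacion) != len(variables):
--         var = next(v for v in variables if v not in asignacion)
--         asignacion[var] = next(c for c in dominios[var]
--                                if all(asignacion.get(n) != c for n in vecinos[var]))
--     return asignacion
-- ===== Notes on version B (the rewrite author's own statement) =====
-- stated objective: simpler
-- what changed: Replaces A's recursive backtracking search with a greedy one-pass while-loop that assigns each unassigned variable its first admissible colour; since every variable has at most 2 neighbours but 3 colours, a valid colour always exists and A's search never actually backtracks, so the values coincide.
import Mathlib
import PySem

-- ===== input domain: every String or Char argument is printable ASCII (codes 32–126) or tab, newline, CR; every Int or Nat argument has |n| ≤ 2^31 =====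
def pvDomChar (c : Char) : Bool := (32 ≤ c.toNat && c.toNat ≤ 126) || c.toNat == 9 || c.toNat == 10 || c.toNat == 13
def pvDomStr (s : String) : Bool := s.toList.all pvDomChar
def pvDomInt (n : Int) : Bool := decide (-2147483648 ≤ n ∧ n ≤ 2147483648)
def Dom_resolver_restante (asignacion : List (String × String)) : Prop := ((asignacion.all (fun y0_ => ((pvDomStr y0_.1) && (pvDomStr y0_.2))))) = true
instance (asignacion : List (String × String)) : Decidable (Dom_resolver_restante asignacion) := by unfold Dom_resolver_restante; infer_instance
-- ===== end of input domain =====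

-- B replaces A's recursive backtracking by a greedy one-pass fill (every variable has at most
-- 2 neighbours but 3 colours, so the first admissible colour always exists and A never backtracks).
-- Both Pythons mutate and return the same dict object; the equivalence proved here is about the
-- return value (the mutation performed is the same in both).

-- ===== PORT A =====
-- module-level constants
def variablesL : List String := ["A", "B", "C", "D", "E"]
def coloresL : List String := ["rojo", "verde", "azul"]
def dominiosD : List (String × List String) :=
  [("A", coloresL), ("B", coloresL), ("C", coloresL), ("D", coloresL), ("E", coloresL)]
def vecinosD : List (String × List String) :=
  [("A", ["B", "E"]), ("B", ["A", "C"]), ("C", ["B", "D"]), ("D", ["C", "E"]), ("E", ["D", "A"])]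

-- dict lookup (first matching key), shared primitive of both ports
def buscar {β : Type} (asig : List (String × β)) (k : String) : Option β :=
  match asig with
  | [] => none
  | (a, b) :: t => if a == k then some b else buscar t k

-- `k in asignacion`
def contiene {β : Type} (asig : List (String × β)) (k : String) : Bool :=
  asig.any (fun p => p.1 == k)

-- the for-loop of es_valido: `if vecino in asignacion and asignacion[vecino] == valor: return False`
def esValidoGo (asig : List (String × String)) (valor : String) : List String → Bool
  | [] => true
  | vecino :: rest =>
    if contiene asig vecino && (buscar asig vecino == some valor) then false
    else esValidoGo asig valor rest

-- vecinos[var]; var is always a key of vecinos at every call site, so getD [] is never taken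
def es_valido (asig : List (String × String)) (var valor : String) : Bool :=
  esValidoGo asig valor ((buscar vecinosD var).getD [])

mutual
  -- the recursion of A; the fuel only makes it total (6 units cover every input: the recursion
  -- depth is at most one more than the number of unassigned variables, which is at most 5)
  def rrAux : Nat → List (String × String) → Option (List (String × String))
    | 0, _ => none
    | f + 1, asig =>
      if asig.length = variablesL.length then some asig
      else
        match variablesL.filter (fun v => !contiene asig v) with
        | [] => none                                      -- Python: [...][0] raises IndexError
        | var :: _ => rrTry f asig var ((buscar dominiosD var).getD [])
  termination_by f _ => (f, 0)
  -- the `for valor in dominios[var]` loop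
  def rrTry : Nat → List (String × String) → String → List String →
      Option (List (String × String))
    | _, _, _, [] => none
    | f, asig, var, valor :: rest =>
      if es_valido asig var valor then
        match rrAux f (asig ++ [(var, valor)]) with       -- asignacion[var] = valor (fresh key appends)
        | some r => if r.length ≠ 0 then some r else rrTry f asig var rest  -- `if resultado:` ; `del` restores asig
        | none => rrTry f asig var rest
      else rrTry f asig var rest
  termination_by f _ _ vals => (f, vals.length + 1)
end

def resolver_restante (asignacion : List (String × String)) : Option (List (String × String)) :=
  rrAux (variablesL.length + 1) asignacion

-- ===== PORT B =====
-- `all(asignacion.get(n) != c for n in vecinos[var])`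
def validB (asig : List (String × String)) (var c : String) : Bool :=
  ((buscar vecinosD var).getD []).all (fun n => !(buscar asig n == some c))

-- B's while-loop; the fuel only makes it total (one unit per iteration, at most 5 iterations)
def altAux : Nat → List (String × String) → Option (List (String × String))
  | 0, _ => none
  | f + 1, asig =>
    if asig.length = variablesL.length then some asig
    else
      match variablesL.find? (fun v => !contiene asig v) with
      | none => none                                      -- Python: next() raises StopIteration
      | some var =>
        match ((buscar dominiosD var).getD []).find? (validB asig var) with
        | none => none                                    -- Python: next() raises StopIteration
        | some c => altAux f (asig ++ [(var, c)])

def resolver_restante_alt (asignacion : List (String × String)) : Option (List (String × String)) :=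
  altAux (variablesL.length + 1) asignacion

-- ===== PRECONDITION & SPEC =====
-- The argument is a Python dict, so its keys are distinct; length ≤ 5 excludes exactly the
-- inputs on which A raises IndexError (with more than 5 keys the unassigned-variable list
-- eventually comes up empty while len(asignacion) never equals len(variables)).
def Pre_resolver_restante (asignacion : List (String × String)) : Prop :=
  (asignacion.map Prod.fst).Nodup ∧ asignacion.length ≤ 5
instance (asignacion : List (String × String)) : Decidable (Pre_resolver_restante asignacion) := by
  unfold Pre_resolver_restante; infer_instance

def pvWitness_resolver_restante : (List (String × String)) := [("B", "rojo"), ("D", "rojo")]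

def Spec_resolver_restante (asignacion : List (String × String)) (out : Option (List (String × String))) : Prop := out = resolver_restante_alt asignacion
instance (asignacion : List (String × String)) (out : Option (List (String × String))) : Decidable (Spec_resolver_restante asignacion out) := by unfold Spec_resolver_restante; infer_instance

-- ===== CLAIM (what is proved, stated in full; the proofs are below) =====
def Claim_equal_resolver_restante : Prop := ∀ (asignacion : List (String × String)), Dom_resolver_restante asignacion → Pre_resolver_restante asignacion → Spec_resolver_restante asignacion (resolver_restante asignacion)

-- ===== LEMMAS AND PROOFS =====

-- number of still-unassigned variables (the decreasing measure of both loops)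
def unasg (asig : List (String × String)) : Nat :=
  (variablesL.filter (fun v => !contiene asig v)).length

theorem buscar_eq_none {β : Type} (asig : List (String × β)) (k : String)
    (h : contiene asig k = false) : buscar asig k = none := by
  induction asig with
  | nil => rfl
  | cons p t ih =>
    obtain ⟨a, b⟩ := p
    have h' : ((a == k) || contiene t k) = false := by simpa [contiene] using h
    obtain ⟨h1, h2⟩ := Bool.or_eq_false_iff.mp h'
    simp [buscar, h1, ih h2]

theorem not_mem_keys {β : Type} (asig : List (String × β)) (k : String)
    (h : contiene asig k = false) : k ∉ asig.map Prod.fst := by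
  intro hk
  obtain ⟨p, hp, rfl⟩ := List.mem_map.mp hk
  have : contiene asig p.1 = true := List.any_eq_true.mpr ⟨p, hp, by simp⟩
  rw [h] at this
  cases this

theorem esValidoGo_eq_all (asig : List (String × String)) (valor : String) (ns : List String) :
    esValidoGo asig valor ns = ns.all (fun n => !(buscar asig n == some valor)) := by
  induction ns with
  | nil => rfl
  | cons n rest ih =>
    by_cases hc : contiene asig n = true
    · by_cases hb : buscar asig n == some valor
      · simp [esValidoGo, hc, hb]
      · simp [esValidoGo, hc, hb, ih]
    · have hn := buscar_eq_none asig n (by simpa using hc)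
      simp [esValidoGo, hc, hn, ih]

theorem es_valido_eq (asig : List (String × String)) (var valor : String) :
    es_valido asig var valor = validB asig var valor := by
  simp [es_valido, validB, esValidoGo_eq_all]

theorem filter_length_lt {α : Type} (l : List α) (p : α → Bool) (x : α)
    (hx : x ∈ l) (hpx : p x = false) : (l.filter p).length < l.length := by
  induction l with
  | nil => cases hx
  | cons a t ih =>
    rcases List.mem_cons.mp hx with rfl | hxt
    · simp only [List.filter_cons, hpx]
      exact Nat.lt_succ_of_le (List.length_filter_le p t)
    · simp only [List.filter_cons]
      split
      · simpa using ih hxt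
      · exact Nat.lt_succ_of_lt (ih hxt)

theorem contiene_append (asig : List (String × String)) (var c v : String) :
    contiene (asig ++ [(var, c)]) v = (contiene asig v || (var == v)) := by
  simp [contiene]

theorem unasg_lt (asig : List (String × String)) (var c : String)
    (hvar : var ∈ variablesL) (hun : contiene asig var = false) :
    unasg (asig ++ [(var, c)]) < unasg asig := by
  unfold unasg
  have heq : variablesL.filter (fun v => !contiene (asig ++ [(var, c)]) v)
      = (variablesL.filter (fun v => !contiene asig v)).filter (fun v => !(var == v)) := by
    rw [List.filter_filter]
    apply List.filter_congr
    intro v _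
    rw [contiene_append]
    cases hc : contiene asig v <;> cases hv : (var == v) <;> simp
  rw [heq]
  refine filter_length_lt _ _ var ?_ (by simp)
  exact List.mem_filter.mpr ⟨hvar, by simp [hun]⟩

theorem altAux_length (f : Nat) (asig r : List (String × String))
    (h : altAux f asig = some r) : r.length = variablesL.length := by
  induction f generalizing asig with
  | zero => simp [altAux] at h
  | succ f ih =>
    rw [altAux] at h
    split at h
    · cases h; assumption
    · split at h
      · cases h
      · split at h
        · cases h
        · exact ih _ h

theorem variablesL_nodup : variablesL.Nodup := by decide

theorem variablesL_length : variablesL.length = 5 := by decide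

-- with at most two forbidden option-values, one of the three distinct colours is always free
theorem exists_color (x y : Option String) :
    (coloresL.find? (fun c => !(x == some c) && !(y == some c))) ≠ none := by
  intro h
  rw [List.find?_eq_none] at h
  have h1 := h "rojo" (by decide)
  have h2 := h "verde" (by decide)
  have h3 := h "azul" (by decide)
  simp at h1 h2 h3
  have h1' : x = some "rojo" ∨ y = some "rojo" := by tauto
  have h2' : x = some "verde" ∨ y = some "verde" := by tauto
  have h3' : x = some "azul" ∨ y = some "azul" := by tauto
  rcases h1' with h1' | h1' <;> rcases h2' with h2' | h2' <;> rcases h3' with h3' | h3' <;> simp_all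

theorem color_exists (asig : List (String × String)) (var : String) (hvar : var ∈ variablesL) :
    ((buscar dominiosD var).getD []).find? (validB asig var) ≠ none := by
  have hv : var = "A" ∨ var = "B" ∨ var = "C" ∨ var = "D" ∨ var = "E" := by
    simpa [variablesL] using hvar
  rcases hv with rfl | rfl | rfl | rfl | rfl
  · have := exists_color (buscar asig "B") (buscar asig "E")
    simpa [dominiosD, vecinosD, buscar, validB] using this
  · have := exists_color (buscar asig "A") (buscar asig "C")
    simpa [dominiosD, vecinosD, buscar, validB] using this
  · have := exists_color (buscar asig "B") (buscar asig "D")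
    simpa [dominiosD, vecinosD, buscar, validB] using this
  · have := exists_color (buscar asig "C") (buscar asig "E")
    simpa [dominiosD, vecinosD, buscar, validB] using this
  · have := exists_color (buscar asig "D") (buscar asig "A")
    simpa [dominiosD, vecinosD, buscar, validB] using this

-- the unassigned-variable list is nonempty while fewer than 5 distinct keys are assigned
theorem filter_ne_nil (asig : List (String × String))
    (_hn : (asig.map Prod.fst).Nodup) (hlt : asig.length < 5) :
    variablesL.filter (fun v => !contiene asig v) ≠ [] := by
  intro h
  have hsub : variablesL ⊆ asig.map Prod.fst := by
    intro v hv
    have hct : contiene asig v = true := by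
      simpa using List.filter_eq_nil_iff.mp h v hv
    obtain ⟨p, hp, hpk⟩ := List.any_eq_true.mp hct
    exact List.mem_map.mpr ⟨p, hp, by simpa using hpk⟩
  have hle : variablesL.length ≤ (asig.map Prod.fst).length :=
    calc variablesL.length = variablesL.toFinset.card :=
          (List.toFinset_card_of_nodup variablesL_nodup).symm
      _ ≤ (asig.map Prod.fst).toFinset.card :=
          Finset.card_le_card (fun x hx => List.mem_toFinset.mpr (hsub (List.mem_toFinset.mp hx)))
      _ ≤ (asig.map Prod.fst).length := List.toFinset_card_le _
  simp [variablesL_length] at hle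
  omega

theorem invariant_step (asig : List (String × String)) (var c : String)
    (hn : (asig.map Prod.fst).Nodup) (hlt : asig.length < 5)
    (hvar : var ∈ variablesL) (hun : contiene asig var = false) :
    ((asig ++ [(var, c)]).map Prod.fst).Nodup ∧ (asig ++ [(var, c)]).length ≤ 5 := by
  constructor
  · rw [List.map_append]
    simp only [List.map_cons, List.map_nil]
    rw [List.nodup_append]
    exact ⟨hn, List.nodup_singleton _, by
      intro a ha b hb
      simp at hb
      subst hb
      intro hab; subst hab
      exact not_mem_keys asig a hun ha⟩
  · simp; omega

-- B always succeeds given enough fuel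
theorem altAux_succeeds (f : Nat) (asig : List (String × String))
    (hn : (asig.map Prod.fst).Nodup) (hle : asig.length ≤ 5) (hf : unasg asig < f) :
    ∃ r, altAux f asig = some r := by
  induction f generalizing asig with
  | zero => omega
  | succ f ih =>
    by_cases hfull : asig.length = variablesL.length
    · exact ⟨asig, by rw [altAux]; simp [hfull]⟩
    · have hlt : asig.length < 5 := by
        have := variablesL_length; omega
      have hfil := filter_ne_nil asig hn hlt
      cases hhead : variablesL.filter (fun v => !contiene asig v) with
      | nil => exact absurd hhead hfil
      | cons var rest =>
        have hvarmem : var ∈ variablesL.filter (fun v => !contiene asig v) := by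
          rw [hhead]; exact List.mem_cons_self
        have hvar : var ∈ variablesL := (List.mem_filter.mp hvarmem).1
        have hun : contiene asig var = false := by
          have := (List.mem_filter.mp hvarmem).2; simpa using this
        have hfind : variablesL.find? (fun v => !contiene asig v) = some var := by
          rw [← List.head?_filter, hhead]; rfl
        have hcol := color_exists asig var hvar
        cases hcolr : ((buscar dominiosD var).getD []).find? (validB asig var) with
        | none => exact absurd hcolr hcol
        | some c =>
          obtain ⟨hn', hle'⟩ := invariant_step asig var c hn hlt hvar hun
          have hf' : unasg (asig ++ [(var, c)]) < f := by
            have := unasg_lt asig var c hvar hun; omega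
          obtain ⟨r, hr⟩ := ih (asig ++ [(var, c)]) hn' hle' hf'
          exact ⟨r, by rw [altAux]; simp [hfull, hfind, hcolr, hr]⟩

-- main equivalence of the two loops
theorem aux_eq (f : Nat) (asig : List (String × String))
    (hn : (asig.map Prod.fst).Nodup) (hle : asig.length ≤ 5) (hf : unasg asig < f) :
    rrAux f asig = altAux f asig := by
  induction f generalizing asig with
  | zero => omega
  | succ f ih =>
    by_cases hfull : asig.length = variablesL.length
    · rw [rrAux, altAux]; simp [hfull]
    · have hlt : asig.length < 5 := by
        have := variablesL_length; omega
      cases hhead : variablesL.filter (fun v => !contiene asig v) with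
      | nil => exact absurd hhead (filter_ne_nil asig hn hlt)
      | cons var rest =>
        have hvarmem : var ∈ variablesL.filter (fun v => !contiene asig v) := by
          rw [hhead]; exact List.mem_cons_self
        have hvar : var ∈ variablesL := (List.mem_filter.mp hvarmem).1
        have hun : contiene asig var = false := by
          have := (List.mem_filter.mp hvarmem).2; simpa using this
        have hfind : variablesL.find? (fun v => !contiene asig v) = some var := by
          rw [← List.head?_filter, hhead]; rfl
        have htry : ∀ vals : List String, rrTry f asig var vals =
            match vals.find? (validB asig var) with
            | some c => altAux f (asig ++ [(var, c)])
            | none => none := by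
          intro vals
          induction vals with
          | nil => simp [rrTry]
          | cons c cs ihc =>
            by_cases hv : validB asig var c = true
            · obtain ⟨hn', hle'⟩ := invariant_step asig var c hn hlt hvar hun
              have hf' : unasg (asig ++ [(var, c)]) < f := by
                have := unasg_lt asig var c hvar hun; omega
              obtain ⟨r, hr⟩ := altAux_succeeds f (asig ++ [(var, c)]) hn' hle' hf'
              have hrl : r.length = variablesL.length := altAux_length f _ r hr
              have hA : rrAux f (asig ++ [(var, c)]) = some r := by
                rw [ih (asig ++ [(var, c)]) hn' hle' hf']; exact hr
              rw [rrTry]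
              simp only [es_valido_eq, hv, if_true, hA, List.find?_cons]
              simp [hrl, variablesL_length, hr]
            · rw [rrTry]
              simp only [es_valido_eq, hv]
              simp only [List.find?_cons, hv]
              simpa using ihc
        rw [rrAux, altAux]
        simp only [hfull, if_false, hhead, hfind]
        rw [htry ((buscar dominiosD var).getD [])]
        cases List.find? (validB asig var) ((buscar dominiosD var).getD []) <;> rfl

theorem unasg_le (asig : List (String × String)) : unasg asig ≤ 5 := by
  have h1 := List.length_filter_le (fun v => !contiene asig v) variablesL
  have h2 := variablesL_length
  unfold unasg
  omega

-- ===== VERDICT (by name: the statement is the Claim_ definition above) =====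
theorem resolver_restante_spec : Claim_equal_resolver_restante := by
  intro asig _ hpre
  obtain ⟨hn, hle⟩ := hpre
  unfold Spec_resolver_restante resolver_restante resolver_restante_alt
  exact aux_eq (variablesL.length + 1) asig hn hle (by have := unasg_le asig; simp [variablesL_length]; omega)
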